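-- pv_equiv track=rewrite | github.com/a-kplatek/AOC-2023 | day_9/main.py | prev_history_value
-- ===== SOURCE A (Python) =====
-- from typing import List
--
-- def prev_history_value(tree: List[List[int]]) -> int:
--     last_elements_reversed = list(reversed(
--         [row[0] for row in tree]
--     ))
--     result = 0
--     for i in range(len(tree)):
--         result = last_elements_reversed[i] - result
--
--     return result
-- ===== SOURCE B (Python) =====
-- from typing import List
--
-- def prev_history_value(tree: List[List[int]]) -> int:
--     total = 0
--     sign = 1
--     for row in tree:
--         total += sign * row[0]
--         sign = -sign
--     return total
-- ===== Notes on version B (the rewrite author's own statement) =====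
-- stated objective: simpler
-- what changed: Drops the reversed-first-elements list and the subtractive fold 'result = x - result'; B makes one forward pass keeping a running total and a sign that flips each row, adding sign*row[0].
import Mathlib
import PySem

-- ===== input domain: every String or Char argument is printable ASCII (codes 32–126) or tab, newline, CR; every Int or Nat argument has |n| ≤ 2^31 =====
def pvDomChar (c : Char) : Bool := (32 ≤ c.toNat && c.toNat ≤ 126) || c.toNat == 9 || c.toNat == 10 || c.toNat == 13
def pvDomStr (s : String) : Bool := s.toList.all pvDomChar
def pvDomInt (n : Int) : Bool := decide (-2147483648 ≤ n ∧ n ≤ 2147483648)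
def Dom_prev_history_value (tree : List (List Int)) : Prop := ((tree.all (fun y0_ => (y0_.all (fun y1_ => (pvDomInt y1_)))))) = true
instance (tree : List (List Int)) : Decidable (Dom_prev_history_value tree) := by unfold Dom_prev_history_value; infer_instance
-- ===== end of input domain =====

-- B replaces A's reversed list + subtractive fold by a single forward pass with a flipping sign (simpler decomposition, same O(n) cost).

-- ===== PORT A =====
-- row[0] is PySem.List.pyGetD row 0 0; safe under Pre_ (every row nonempty).
def prev_history_value (tree : List (List Int)) : Int :=
  let last_elements_reversed := (tree.map (fun row => PySem.List.pyGetD row 0 0)).reverse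
  (PySem.List.pyRange 0 tree.length 1).foldl
    (fun result i => PySem.List.pyGetD last_elements_reversed i 0 - result) 0

-- ===== PORT B =====
def prev_history_value_alt (tree : List (List Int)) : Int :=
  (tree.foldl (fun (st : Int × Int) row => (st.1 + st.2 * PySem.List.pyGetD row 0 0, -st.2)) (0, 1)).1

-- ===== PRECONDITION & SPEC =====
-- Pre_ excludes exactly the inputs where both Pythons raise IndexError: a row with no elements (row[0]).
def Pre_prev_history_value (tree : List (List Int)) : Prop := ∀ row ∈ tree, row ≠ []
instance (tree : List (List Int)) : Decidable (Pre_prev_history_value tree) := by unfold Pre_prev_history_value; infer_instance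
def pvWitness_prev_history_value : List (List Int) := [[0, 3], [2], [5, -1]]

def Spec_prev_history_value (tree : List (List Int)) (out : Int) : Prop := out = prev_history_value_alt tree
instance (tree : List (List Int)) (out : Int) : Decidable (Spec_prev_history_value tree out) := by unfold Spec_prev_history_value; infer_instance

-- ===== CLAIM (what is proved, stated in full; the proofs are below) =====
def Claim_equal_prev_history_value : Prop := ∀ (tree : List (List Int)), Dom_prev_history_value tree → Pre_prev_history_value tree → Spec_prev_history_value tree (prev_history_value tree)

-- ===== LEMMAS AND PROOFS =====

-- the alternating signed sum a0 - a1 + a2 - … both programs compute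
def pvAltSum : List Int → Int
  | [] => 0
  | a :: t => a - pvAltSum t

theorem pvA_foldl_rev (l : List Int) :
    l.reverse.foldl (fun r x => x - r) 0 = pvAltSum l := by
  induction l with
  | nil => rfl
  | cons a t ih => simp [pvAltSum, List.foldl_append, ih]

theorem pvB_foldl (tree : List (List Int)) (s σ : Int) :
    (tree.foldl (fun (st : Int × Int) row =>
        (st.1 + st.2 * PySem.List.pyGetD row 0 0, -st.2)) (s, σ)).1
      = s + σ * pvAltSum (tree.map (fun row => PySem.List.pyGetD row 0 0)) := by
  induction tree generalizing s σ with
  | nil => simp [pvAltSum]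
  | cons a t ih => simp only [List.foldl_cons, ih, List.map_cons, pvAltSum]; ring

theorem prev_history_value_spec : Claim_equal_prev_history_value := by
  intro tree _ hpre
  unfold Spec_prev_history_value
  simp only [prev_history_value, prev_history_value_alt]
  rw [show ((tree.length : Int))
      = (((tree.map (fun row => PySem.List.pyGetD row 0 0)).reverse).length : Int) by simp]
  rw [PySem.List.foldl_pyRange_zero_pyGetD' ((tree.map (fun row => PySem.List.pyGetD row 0 0)).reverse)
      0 (fun result x => x - result) 0]
  rw [pvA_foldl_rev]
  rw [pvB_foldl]
  ring
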